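-- pv_equiv track=rewrite | github.com/gwct/core | python/lib/treeparse.py | rootedOrNot
-- ===== SOURCE A (Python) =====
-- def rootedOrNot(treedict):
-- # Tells whether a tree is rooted or not based on the number of nodes in the
-- # tree.
--
-- 	num_tips = len([n for n in treedict if treedict[n][2] == 'tip']);
-- 	num_internal = len([n for n in treedict if treedict[n][2] != 'tip']);
-- 	if num_internal != (num_tips - 1):
-- 		return False;
-- 	elif num_internal == (num_tips - 1):
-- 		return True;
-- 	else:
-- 		return -1;
-- ===== SOURCE B (Python) =====
-- def rootedOrNot(treedict):
--     # Signed-balance scan: each tip contributes +1, each internal node -1.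
--     # A tree is rooted iff internal == tips - 1, i.e. iff the balance is exactly 1.
--     bal = 0
--     for v in treedict.values():
--         bal += 1 if v[2] == 'tip' else -1
--     return bal == 1
-- ===== Notes on version B (the rewrite author's own statement) =====
-- stated objective: simpler
-- what changed: Replaces the two key-iterating list comprehensions with per-key dict lookups and the count comparison by a single signed-balance scan over the values (+1 per tip, -1 per internal node) that returns balance == 1; no counts or lengths are computed at all.
-- outside the precondition, e.g. on rootedOrNot({'a': ['', '']}): A raises IndexError, B raises IndexError
import Mathlib
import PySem

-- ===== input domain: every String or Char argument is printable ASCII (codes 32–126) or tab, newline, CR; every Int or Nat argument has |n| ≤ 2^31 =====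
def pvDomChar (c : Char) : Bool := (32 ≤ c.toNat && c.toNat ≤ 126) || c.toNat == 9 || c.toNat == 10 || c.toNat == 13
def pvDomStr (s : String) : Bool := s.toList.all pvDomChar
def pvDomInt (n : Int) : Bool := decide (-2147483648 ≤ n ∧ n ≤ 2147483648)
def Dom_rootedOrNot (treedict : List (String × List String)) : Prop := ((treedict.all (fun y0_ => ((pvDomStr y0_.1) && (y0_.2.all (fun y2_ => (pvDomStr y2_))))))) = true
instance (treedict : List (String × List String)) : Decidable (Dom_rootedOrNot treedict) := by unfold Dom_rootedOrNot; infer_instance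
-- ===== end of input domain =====

-- B replaces A's two counting comprehensions by one signed-balance scan over the
-- values (+1 per tip, -1 per internal) and returns balance == 1: simpler, same O(n).


-- ===== PORT A =====
-- treedict[n][2]: first-match lookup of key n, then Python index 2 (none = IndexError,
-- excluded by Pre_).
def aLookup2 (treedict : List (String × List String)) (n : String) : Option String :=
  ((PySem.Dict.mk treedict).get? n).bind (fun v => PySem.List.pyGet? v 2)

def rootedOrNot (treedict : List (String × List String)) : Bool :=
  let numTips : Int :=
    ((treedict.map Prod.fst).filter (fun n => aLookup2 treedict n == some "tip")).length
  let numInternal : Int :=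
    ((treedict.map Prod.fst).filter (fun n => !(aLookup2 treedict n == some "tip"))).length
  if numInternal ≠ numTips - 1 then false
  else if numInternal = numTips - 1 then true
  else false  -- Python's 'return -1' branch is unreachable

-- ===== PORT B =====
def rootedOrNot_alt (treedict : List (String × List String)) : Bool :=
  let bal : Int :=
    treedict.foldl (fun b p => b + if PySem.List.pyGet? p.2 2 == some "tip" then 1 else -1) 0
  decide (bal = 1)

-- ===== PRECONDITION & SPEC =====
-- Pre_ excludes value lists shorter than 3 (Python's v[2] raises IndexError) and
-- duplicate keys, which a Python dict cannot carry.
def Pre_rootedOrNot (treedict : List (String × List String)) : Prop :=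
  (∀ p ∈ treedict, 3 ≤ p.2.length) ∧ (treedict.map Prod.fst).Nodup
instance (treedict : List (String × List String)) : Decidable (Pre_rootedOrNot treedict) := by unfold Pre_rootedOrNot; infer_instance
def pvWitness_rootedOrNot : (List (String × List String)) :=
  [("a", ["", "", "tip"]), ("b", ["", "", "tip"]), ("r", ["a", "b", "internal"])]
def Spec_rootedOrNot (treedict : List (String × List String)) (out : Bool) : Prop := out = rootedOrNot_alt treedict
instance (treedict : List (String × List String)) (out : Bool) : Decidable (Spec_rootedOrNot treedict out) := by unfold Spec_rootedOrNot; infer_instance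

-- ===== CLAIM (what is proved, stated in full; the proofs are below) =====
def Claim_equal_rootedOrNot : Prop := ∀ (treedict : List (String × List String)), Dom_rootedOrNot treedict → Pre_rootedOrNot treedict → Spec_rootedOrNot treedict (rootedOrNot treedict)

-- ===== LEMMAS AND PROOFS =====

-- Under Nodup keys, the dict lookup of each entry's own key yields that entry's value.
theorem aLookup_self {td : List (String × List String)}
    (hnd : (td.map Prod.fst).Nodup) :
    ∀ p ∈ td, (PySem.Dict.mk td).get? p.1 = some p.2 := by
  induction td with
  | nil => intro p hp; cases hp
  | cons q rest ih =>
    simp only [List.map_cons, List.nodup_cons] at hnd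
    intro p hp
    obtain ⟨k, v⟩ := q
    rcases List.mem_cons.mp hp with hp | hp
    · subst hp; simp [PySem.Dict.get?_mk_cons]
    · have hne : k ≠ p.1 := by
        intro h; apply hnd.1; rw [h]; exact List.mem_map.mpr ⟨p, hp, rfl⟩
      rw [PySem.Dict.get?_mk_cons, if_neg (by simp [hne]), ih hnd.2 p hp]

theorem filter_keys_eq {td : List (String × List String)}
    (hnd : (td.map Prod.fst).Nodup) (f : Option String → Bool) :
    ((td.map Prod.fst).filter (fun n => f (aLookup2 td n))).length
      = (td.filter (fun p => f (PySem.List.pyGet? p.2 2))).length := by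
  rw [List.filter_map, List.length_map]
  congr 1
  apply List.filter_congr
  intro p hp
  simp only [Function.comp, aLookup2, aLookup_self hnd p hp, Option.bind_some]

theorem foldl_balance (l : List (String × List String)) (acc : Int) :
    l.foldl (fun b p => b + if PySem.List.pyGet? p.2 2 == some "tip" then 1 else -1) acc
      = acc + (l.filter (fun p => PySem.List.pyGet? p.2 2 == some "tip")).length
            - (l.filter (fun p => !(PySem.List.pyGet? p.2 2 == some "tip"))).length := by
  induction l generalizing acc with
  | nil => simp
  | cons q rest ih =>
    cases hb : (PySem.List.pyGet? q.2 2 == some "tip") with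
    | false =>
      simp only [List.foldl_cons, List.filter_cons, hb, Bool.false_eq_true, if_false,
        Bool.not_false, if_true, List.length_cons]
      rw [ih]; push_cast; ring
    | true =>
      simp only [List.foldl_cons, List.filter_cons, hb, if_true, Bool.not_true,
        Bool.false_eq_true, if_false, List.length_cons]
      rw [ih]; push_cast; ring

-- ===== VERDICT (by name: the statement is the Claim_ definition above) =====
theorem rootedOrNot_spec : Claim_equal_rootedOrNot := by
  intro td _ hpre
  unfold Spec_rootedOrNot rootedOrNot rootedOrNot_alt
  have hnd := hpre.2
  rw [foldl_balance]
  rw [filter_keys_eq hnd (fun o => o == some "tip"),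
      filter_keys_eq hnd (fun o => !(o == some "tip"))]
  set t := (td.filter (fun p => PySem.List.pyGet? p.2 2 == some "tip")).length with ht
  set i := (td.filter (fun p => !(PySem.List.pyGet? p.2 2 == some "tip"))).length with hi
  by_cases h : (i : Int) = (t : Int) - 1
  · simp only [h, ne_eq, not_true_eq_false, if_false, if_true]
    symm; rw [decide_eq_true_eq]; omega
  · simp only [ne_eq, h, not_false_eq_true, if_true]
    symm; rw [decide_eq_false_iff_not]; omega
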